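-- pv_equiv track=rewrite | github.com/vikiru/CodeSmell | src/main/python/create_dictionary.py | clean_method_full_name
-- ===== SOURCE A (Python) =====
-- NESTED_SEP = "$"
--
-- COLON_SEP = ":"
--
-- DOT_SEP = "."
--
-- def clean_method_full_name(method_full_name):
--     """Given the full name of a method consisting of the package, class and signature of the method. Return the name separating
--     the package, class and method name by a dollar sign.
--     """
--
--     str_to_return = method_full_name
--     if COLON_SEP in method_full_name:
--         index_signature = str_to_return.index(COLON_SEP)
--         str_to_return = str_to_return[:index_signature]
--         for _ in range(0, 2):
--             if DOT_SEP in str_to_return: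
--                 index_sep = str_to_return.rindex(DOT_SEP)
--                 str_to_return = """{start}{new_char}{end}""".format(
--                     start=str_to_return[:index_sep],
--                     new_char=str_to_return[index_sep].replace(DOT_SEP, NESTED_SEP),
--                     end=str_to_return[index_sep + 1 : len(str_to_return)],
--                 )
--     return str_to_return
-- ===== SOURCE B (Python) =====
-- def clean_method_full_name(method_full_name):
--     """Separate package, class and method name (the part before the first colon)
--     by dollar signs: one backward character scan over the head that turns the
--     first two dots it meets into '$'."""
--     if ":" not in method_full_name:
--         return method_full_name
--     head = method_full_name.split(":", 1)[0]
--     out = []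
--     k = 2
--     for ch in reversed(head):
--         if k and ch == ".":
--             out.append("$")
--             k -= 1
--         else:
--             out.append(ch)
--     return "".join(reversed(out))
-- ===== Notes on version B (the rewrite author's own statement) =====
-- stated objective: alternative
-- what changed: Replaces A's two rindex/slice/rebuild passes over the head by a single backward character scan with a countdown accumulator that rewrites the first two dots it meets to dollar signs.
import Mathlib
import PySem

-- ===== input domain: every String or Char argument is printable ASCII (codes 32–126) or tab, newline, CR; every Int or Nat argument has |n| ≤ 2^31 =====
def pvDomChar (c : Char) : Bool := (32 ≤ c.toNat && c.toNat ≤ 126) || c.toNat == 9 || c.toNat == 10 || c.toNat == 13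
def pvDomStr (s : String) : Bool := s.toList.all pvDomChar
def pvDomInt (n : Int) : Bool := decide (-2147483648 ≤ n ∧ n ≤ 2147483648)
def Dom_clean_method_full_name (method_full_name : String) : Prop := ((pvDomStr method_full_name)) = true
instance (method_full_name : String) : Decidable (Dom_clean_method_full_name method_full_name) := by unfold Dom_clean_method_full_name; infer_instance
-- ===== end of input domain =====

-- B replaces A's two rindex/slice/rebuild passes over the head by ONE backward
-- character scan with a countdown that turns the first two dots met into dollars.

-- ===== PORT A =====
-- A's for-body: replace the last '.' (rindex) by '$' via slice/rebuild.
-- t[index_sep] (one-char string at a valid index) is ported as the slice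
-- t[index_sep:index_sep+1], which is exactly equal for 0 ≤ index_sep < len(t).
def pvStepA (t : String) : String :=
  if PySem.Str.isIn "." t then
    let index_sep := PySem.Str.rfind t "."   -- .rindex: '.' is present, so rindex = rfind
    (PySem.Str.slice t none (some index_sep)) ++
      (PySem.Str.replace (PySem.Str.slice t (some index_sep) (some (index_sep + 1))) "." "$") ++
      (PySem.Str.slice t (some (index_sep + 1)) (some (PySem.Str.len t)))
  else t

def clean_method_full_name (method_full_name : String) : String :=
  let str_to_return := method_full_name
  if PySem.Str.isIn ":" method_full_name then
    let index_signature := PySem.Str.find str_to_return ":"   -- .index: ':' is present, so index = find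
    let str1 := PySem.Str.slice str_to_return none (some index_signature)
    (PySem.List.pyRange 0 2 1).foldl (fun t _ => pvStepA t) str1
  else str_to_return

-- ===== PORT B =====
-- B's backward for-loop over reversed(head) with the countdown k, written as the
-- obvious structural recursion on the reversed character list (state = k).
def pvRepl : Nat → List Char → List Char
  | _, [] => []
  | 0, c :: rest => c :: pvRepl 0 rest
  | k + 1, c :: rest =>
    if c = '.' then '$' :: pvRepl k rest else c :: pvRepl (k + 1) rest

def clean_method_full_name_alt (method_full_name : String) : String :=
  if !(PySem.Str.isIn ":" method_full_name) then method_full_name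
  else
    -- method_full_name.split(":", 1)[0]: with ':' present this is exactly the
    -- characters before the first ':' — ported as takeWhile (· ≠ ':').
    let head := method_full_name.toList.takeWhile (fun c => c ≠ ':')
    String.ofList (pvRepl 2 head.reverse).reverse

-- ===== PRECONDITION & SPEC =====
def Spec_clean_method_full_name (method_full_name : String) (out : String) : Prop := out = clean_method_full_name_alt method_full_name
instance (method_full_name : String) (out : String) : Decidable (Spec_clean_method_full_name method_full_name out) := by unfold Spec_clean_method_full_name; infer_instance

-- ===== CLAIM (what is proved, stated in full; the proofs are below) =====
def Claim_equal_clean_method_full_name : Prop := ∀ (method_full_name : String), Dom_clean_method_full_name method_full_name → Spec_clean_method_full_name method_full_name (clean_method_full_name method_full_name)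

-- ===== LEMMAS AND PROOFS =====

-- last-dot splitter used only to CHARACTERISE both programs in the proofs
def pvSplitLast : List Char → Option (List Char × List Char)
  | [] => none
  | c :: rest =>
    match pvSplitLast rest with
    | some (u, v) => some (c :: u, v)
    | none => if c = '.' then some ([], rest) else none

theorem pvSplitLast_none_iff (cs : List Char) : pvSplitLast cs = none ↔ '.' ∉ cs := by
  induction cs with
  | nil => simp [pvSplitLast]
  | cons c rest ih =>
    simp only [pvSplitLast, List.mem_cons]
    cases h : pvSplitLast rest with
    | some uv =>
      constructor
      · intro hc; cases hc
      · intro hc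
        exact absurd (ih.mpr (fun hm => hc (Or.inr hm))) (by simp [h])
    | none =>
      have hrest : '.' ∉ rest := ih.mp h
      by_cases hc : c = '.'
      · subst hc; simp
      · simp [hc, hrest, Ne.symm hc]

theorem pvSplitLast_some (cs u v : List Char) (h : pvSplitLast cs = some (u, v)) :
    cs = u ++ '.' :: v ∧ '.' ∉ v := by
  induction cs generalizing u v with
  | nil => simp [pvSplitLast] at h
  | cons c rest ih =>
    simp only [pvSplitLast] at h
    cases hr : pvSplitLast rest with
    | some uv =>
      rw [hr] at h
      obtain ⟨u', v'⟩ := uv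
      simp only [Option.some.injEq, Prod.mk.injEq] at h
      obtain ⟨he, hnv⟩ := ih u' v' hr
      refine ⟨?_, h.2 ▸ hnv⟩
      rw [← h.1, ← h.2, he]; rfl
    | none =>
      rw [hr] at h
      by_cases hc : c = '.'
      · subst hc
        simp only [reduceIte, Option.some.injEq, Prod.mk.injEq] at h
        exact ⟨by simp [← h.1, ← h.2], h.2 ▸ (pvSplitLast_none_iff rest).mp hr⟩
      · simp [hc] at h

theorem pvSplitLast_append (u v : List Char) (hv : '.' ∉ v) :
    pvSplitLast (u ++ '.' :: v) = some (u, v) := by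
  induction u with
  | nil => simp [pvSplitLast, (pvSplitLast_none_iff v).mpr hv]
  | cons c u' ih => simp [pvSplitLast, ih]

-- [c].isPrefixOf xs ↔ xs starts with c
theorem singleton_isPrefixOf (c : Char) (xs : List Char) :
    [c].isPrefixOf xs = true ↔ ∃ ys, xs = c :: ys := by
  cases xs with
  | nil => simp [List.isPrefixOf]
  | cons y ys =>
    simp only [List.isPrefixOf, Bool.and_true]
    constructor
    · intro h; exact ⟨ys, by rw [beq_iff_eq] at h; rw [h]⟩
    · rintro ⟨zs, hz⟩; injection hz with h1 h2; subst h1; subst h2; simp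

theorem rfind_go_zero (s sub : List Char) :
    PySem.Chars.rfind.go s sub 0 = if sub.isPrefixOf s then 0 else -1 := rfl

theorem rfind_go_succ (s sub : List Char) (j : Nat) :
    PySem.Chars.rfind.go s sub (j + 1) =
      if sub.isPrefixOf (List.drop (j + 1) s) then ((j + 1 : Nat) : Int)
      else PySem.Chars.rfind.go s sub j := rfl

-- rfind of '.' on u ++ '.' :: v with no '.' in v is u.length
theorem rfind_go_last (c : Char) (u v : List Char) (hv : c ∉ v) :
    ∀ k, u.length ≤ k → PySem.Chars.rfind.go (u ++ c :: v) [c] k = (u.length : Int) := by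
  intro k
  induction k with
  | zero =>
    intro hk
    have hu : u = [] := List.eq_nil_of_length_eq_zero (Nat.le_zero.mp hk)
    subst hu
    rw [rfind_go_zero]
    simp [(singleton_isPrefixOf c (c :: v)).mpr ⟨v, rfl⟩]
  | succ j ih =>
    intro hk
    rw [rfind_go_succ]
    rcases Nat.lt_or_ge j u.length with hj | hj
    · have : u.length = j + 1 := Nat.le_antisymm hk hj
      have hd : List.drop (j + 1) (u ++ c :: v) = c :: v := by
        rw [← this, List.drop_left]
      rw [hd]
      simp [(singleton_isPrefixOf c (c :: v)).mpr ⟨v, rfl⟩, this]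
    · have hd : List.drop (j + 1) (u ++ c :: v) = List.drop (j + 1 - u.length) (c :: v) := by
        rw [List.drop_append, List.drop_eq_nil_of_le (by omega), List.nil_append]
      have hpos : 1 ≤ j + 1 - u.length := by omega
      have hd2 : List.drop (j + 1 - u.length) (c :: v) = List.drop (j - u.length) v := by
        have : j + 1 - u.length = (j - u.length) + 1 := by omega
        rw [this, List.drop_succ_cons]
      have hnp : ¬ ([c].isPrefixOf (List.drop (j + 1) (u ++ c :: v)) = true) := by
        rw [hd, hd2]
        intro hp
        obtain ⟨ys, hys⟩ := (singleton_isPrefixOf c _).mp hp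
        have : c ∈ List.drop (j - u.length) v := by rw [hys]; exact List.mem_cons_self
        exact hv (List.mem_of_mem_drop this)
      simp only [hnp, if_false, Bool.false_eq_true]
      exact ih hj

theorem rfind_last (c : Char) (u v : List Char) (hv : c ∉ v) :
    PySem.Chars.rfind (u ++ c :: v) [c] = (u.length : Int) := by
  unfold PySem.Chars.rfind
  exact rfind_go_last c u v hv _ (by simp)

-- membership form of 'sub in s' for a one-char sub
theorem isIn_singleton (c : Char) (cs : List Char) :
    PySem.Chars.isIn [c] cs = true ↔ c ∈ cs := by
  rw [PySem.Chars.isIn_iff_infix]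
  constructor
  · rintro ⟨p, s, h⟩; rw [← h]; simp
  · intro h
    obtain ⟨p, s, h⟩ := List.append_of_mem h
    exact ⟨p, s, by simp [h]⟩

-- list-level characterisation of A's loop body
def pvStepAL (cs : List Char) : List Char :=
  match pvSplitLast cs with
  | none => cs
  | some (u, v) => u ++ '$' :: v

theorem toList_stepA (t : String) : (pvStepA t).toList = pvStepAL t.toList := by
  unfold pvStepA pvStepAL
  cases h : pvSplitLast t.toList with
  | none =>
    have hnot : '.' ∉ t.toList := (pvSplitLast_none_iff _).mp h
    have hfalse : PySem.Chars.isIn ['.'] t.toList = false :=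
      Bool.eq_false_iff.mpr (fun hc => hnot ((isIn_singleton _ _).mp hc))
    simp [PySem.Str.isIn_eq, show ("." : String).toList = ['.'] from rfl, hfalse]
  | some uv =>
    obtain ⟨u, v⟩ := uv
    obtain ⟨hcs, hv⟩ := pvSplitLast_some _ _ _ h
    have hdot : ("." : String).toList = ['.'] := rfl
    have hisin : PySem.Chars.isIn ['.'] t.toList = true := by
      rw [isIn_singleton, hcs]; simp
    have hrf : PySem.Chars.rfind t.toList ['.'] = (u.length : Int) := by
      rw [hcs]; exact rfind_last '.' u v hv
    simp only [PySem.Str.isIn_eq, PySem.Str.rfind_eq, hdot, hisin, if_true]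
    simp only [String.toList_append, PySem.Str.toList_slice, PySem.Str.toList_replace,
      PySem.Chars.slice_eq_listSlice, hdot, show ("$" : String).toList = ['$'] from rfl,
      hrf, PySem.Str.len_eq]
    rw [PySem.List.slice_to t.toList (by positivity)]
    have h1 : (u.length : Int).toNat = u.length := Int.toNat_natCast _
    have hc1 : ((u.length : Int) + 1) = ((u.length + 1 : Nat) : Int) := by push_cast; ring
    have hsl2 : PySem.List.slice t.toList (some (u.length : Int)) (some ((u.length : Int) + 1)) = ['.'] := by
      have := PySem.List.slice_natCast_add (xs := t.toList) (j := u.length) (n := 1)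
      simp only [Nat.cast_one] at this
      rw [this, hcs, List.drop_left]
      rfl
    have hlen : (t.toList.length : Int) = ((u.length + 1 : Nat) : Int) + ((v.length : Nat) : Int) := by
      rw [hcs]; push_cast; simp; ring
    have hsl3 : PySem.List.slice t.toList (some ((u.length : Int) + 1)) (some (t.toList.length : Int)) = v := by
      rw [hc1, hlen, PySem.List.slice_natCast_add, hcs]
      have : u ++ '.' :: v = (u ++ ['.']) ++ v := by simp
      rw [this]
      have hl : (u ++ ['.']).length = u.length + 1 := by simp
      rw [← hl, List.drop_left, List.take_of_length_le (le_refl _)]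
    rw [hsl2, hsl3, h1, hcs, List.take_left]
    have : PySem.Chars.replace ['.'] ['.'] ['$'] = ['$'] := by decide
    rw [this]
    simp

theorem stepAL_of_none (cs : List Char) (h : pvSplitLast cs = none) : pvStepAL cs = cs := by
  unfold pvStepAL; rw [h]

-- pvRepl facts
theorem pvRepl_zero (xs : List Char) : pvRepl 0 xs = xs := by
  induction xs with
  | nil => rfl
  | cons c rest ih => simp [pvRepl, ih]

theorem pvRepl_no_dot (k : Nat) (xs : List Char) (h : '.' ∉ xs) : pvRepl k xs = xs := by
  induction xs generalizing k with
  | nil => cases k <;> rfl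
  | cons c rest ih =>
    have hc : c ≠ '.' := fun hc => h (by simp [hc])
    have hrest : '.' ∉ rest := fun hm => h (List.mem_cons_of_mem _ hm)
    cases k with
    | zero => simp [pvRepl, ih 0 hrest]
    | succ j => simp [pvRepl, hc, ih (j + 1) hrest]

theorem pvRepl_skip (k : Nat) (w r : List Char) (hw : '.' ∉ w) :
    pvRepl (k + 1) (w ++ '.' :: r) = w ++ '$' :: pvRepl k r := by
  induction w with
  | nil => simp [pvRepl]
  | cons c w' ih =>
    have hc : c ≠ '.' := fun hc => hw (by simp [hc])
    have hw' : '.' ∉ w' := fun hm => hw (List.mem_cons_of_mem _ hm)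
    simp [pvRepl, hc, ih hw']

-- two applications of A's body = B's backward scan with k = 2
theorem two_steps_eq_repl (cs : List Char) :
    pvStepAL (pvStepAL cs) = (pvRepl 2 cs.reverse).reverse := by
  cases h : pvSplitLast cs with
  | none =>
    have hnot : '.' ∉ cs := (pvSplitLast_none_iff _).mp h
    rw [stepAL_of_none cs h, stepAL_of_none cs h,
      pvRepl_no_dot 2 cs.reverse (by simpa using hnot), List.reverse_reverse]
  | some uv =>
    obtain ⟨u, v⟩ := uv
    obtain ⟨hcs, hv⟩ := pvSplitLast_some _ _ _ h
    have h1 : pvStepAL cs = u ++ '$' :: v := by unfold pvStepAL; rw [h]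
    have hrev : cs.reverse = v.reverse ++ '.' :: u.reverse := by
      rw [hcs]; simp
    rw [h1, hrev, pvRepl_skip 1 v.reverse u.reverse (by simpa using hv)]
    cases h2 : pvSplitLast u with
    | none =>
      have hnu : '.' ∉ u := (pvSplitLast_none_iff _).mp h2
      have hno : pvSplitLast (u ++ '$' :: v) = none := by
        rw [pvSplitLast_none_iff]
        simp only [List.mem_append, List.mem_cons]
        push Not
        exact ⟨hnu, by decide, hv⟩
      rw [stepAL_of_none _ hno, pvRepl_no_dot 1 u.reverse (by simpa using hnu)]
      simp
    | some pq =>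
      obtain ⟨p, q⟩ := pq
      obtain ⟨hu, hq⟩ := pvSplitLast_some _ _ _ h2
      have hurev : u.reverse = q.reverse ++ '.' :: p.reverse := by rw [hu]; simp
      have hrw : u ++ '$' :: v = p ++ '.' :: (q ++ '$' :: v) := by rw [hu]; simp
      have hnq : '.' ∉ q ++ '$' :: v := by
        simp only [List.mem_append, List.mem_cons]
        push Not
        exact ⟨hq, by decide, hv⟩
      have hA : pvStepAL (u ++ '$' :: v) = p ++ '$' :: (q ++ '$' :: v) := by
        unfold pvStepAL
        rw [hrw, pvSplitLast_append p (q ++ '$' :: v) hnq]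
      rw [hA, hurev, pvRepl_skip 0 q.reverse p.reverse (by simpa using hq), pvRepl_zero]
      simp

-- find of the first ':' on w ++ ':' :: r with ':' ∉ w is w.length
theorem find_first (w r : List Char) (hw : ':' ∉ w) :
    PySem.Chars.find (w ++ ':' :: r) [':'] = (w.length : Int) := by
  have hin : [':'] <:+: (w ++ ':' :: r) := ⟨w, r, by simp⟩
  have h0 : 0 ≤ PySem.Chars.find (w ++ ':' :: r) [':'] :=
    (PySem.Chars.find_nonneg_iff _ _).mpr hin
  obtain ⟨hpre, hmin⟩ := PySem.Chars.find_spec h0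
  set n := (PySem.Chars.find (w ++ ':' :: r) [':']).toNat with hn
  have hle : n ≤ w.length := by
    by_contra hgt
    exact (hmin w.length (by omega)) ⟨r, by simp⟩
  have heq : n = w.length := by
    rcases Nat.lt_or_ge n w.length with hlt | hge
    · exfalso
      obtain ⟨ys, hys⟩ := hpre
      have hdrop : List.drop n (w ++ ':' :: r) = List.drop n w ++ ':' :: r := by
        rw [List.drop_append_of_le_length (by omega)]
      have hmem : ':' ∈ w := by
        have : ':' ∈ List.drop n w ++ ':' :: r := by rw [← hdrop, ← hys]; simp
        cases hd : List.drop n w with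
        | nil => exact absurd hd (by intro hnil; simp [List.drop_eq_nil_iff] at hnil; omega)
        | cons x xs =>
          have hx : x = ':' := by
            have h2 := congrArg List.head? hys
            rw [hdrop, hd] at h2
            simpa using h2.symm
          exact List.mem_of_mem_drop (by rw [hd, hx]; simp)
      exact hw hmem
    · omega
  rw [← Int.toNat_of_nonneg h0, ← hn, heq]

-- head slice of A = takeWhile of B
theorem head_eq (s : String) (h : PySem.Str.isIn ":" s = true) :
    (PySem.Str.slice s none (some (PySem.Str.find s ":"))).toList
      = s.toList.takeWhile (fun c => c ≠ ':') := by
  have hmem : ':' ∈ s.toList := by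
    have := (PySem.Str.isIn_iff_infix ":" s).mp h
    obtain ⟨p, q, hp⟩ := this
    rw [← hp]; simp [show (":" : String).toList = [':'] from rfl]
  set w := s.toList.takeWhile (fun c => c ≠ ':') with hwdef
  have hdw : s.toList.dropWhile (fun c => c ≠ ':') ≠ [] := by
    intro hnil
    rw [List.dropWhile_eq_nil_iff] at hnil
    have := hnil ':' hmem
    simp at this
  obtain ⟨x, r, hxr⟩ : ∃ x r, s.toList.dropWhile (fun c => c ≠ ':') = x :: r := by
    cases hd : s.toList.dropWhile (fun c => c ≠ ':') with
    | nil => exact absurd hd hdw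
    | cons x r => exact ⟨x, r, rfl⟩
  have hx : x = ':' := by
    have hhead := List.head_dropWhile_not (p := fun c => decide (c ≠ ':')) (l := s.toList) (by rw [hxr]; simp)
    simp only [hxr, List.head_cons] at hhead
    simpa using hhead
  have hsplit : s.toList = w ++ ':' :: r := by
    rw [hwdef]
    conv_lhs => rw [← List.takeWhile_append_dropWhile (p := fun c => decide (c ≠ ':')) (l := s.toList)]
    rw [hxr, hx]
  have hwnot : ':' ∉ w := by
    intro hc
    have := List.mem_takeWhile_imp hc
    simp at this
  have hfind : PySem.Chars.find s.toList [':'] = (w.length : Int) := by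
    rw [hsplit]; exact find_first w r hwnot
  rw [PySem.Str.toList_slice, PySem.Chars.slice_eq_listSlice,
    PySem.Str.find_eq, show (":" : String).toList = [':'] from rfl, hfind,
    PySem.List.slice_to _ (by positivity), Int.toNat_natCast, hsplit, List.take_left]

-- ===== VERDICT (by name: the statement is the Claim_ definition above) =====
theorem clean_method_full_name_spec : Claim_equal_clean_method_full_name := by
  unfold Claim_equal_clean_method_full_name
  intro s _
  unfold Spec_clean_method_full_name clean_method_full_name clean_method_full_name_alt
  cases hc : PySem.Str.isIn ":" s with
  | false => simp
  | true =>
    simp only [if_true, Bool.not_true, Bool.false_eq_true, if_false]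
    have hrange : PySem.List.pyRange 0 2 1 = [0, 1] := by
      rw [PySem.List.pyRange_one_cons (by norm_num), PySem.List.pyRange_one_cons (by norm_num),
        PySem.List.pyRange_one_eq_nil (by norm_num)]
      norm_num
    rw [hrange]
    simp only [List.foldl]
    apply String.toList_inj.mp
    rw [toList_stepA, toList_stepA, two_steps_eq_repl, head_eq s hc]
    simp
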